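-- pv_equiv track=rewrite | github.com/01HARSHIT1/dailydose | basic_dsa_twenty_four.py | is_duck_number_iterative
-- ===== SOURCE A (Python) =====
-- def is_duck_number_iterative(n):
--     """
--     Check if a number is Duck number using iterative approach
--     Time Complexity: O(log n)
--     Space Complexity: O(1)
--     """
--     if n <= 0:
--         return False
--
--     has_zero = False
--     first_digit = True
--
--     while n > 0:
--         digit = n % 10
--         if digit == 0:
--             has_zero = True
--         n //= 10
--         first_digit = False
--
--     return has_zero
-- ===== SOURCE B (Python) =====
-- def is_duck_number_iterative(n):
--     return n > 0 and '0' in str(n)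
-- ===== Notes on version B (the rewrite author's own statement) =====
-- stated objective: idiomatic
-- what changed: Replaces the arithmetic digit-extraction loop with its has_zero/first_digit accumulators by a positivity guard plus a single substring membership test on the decimal string of n.
import Mathlib
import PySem

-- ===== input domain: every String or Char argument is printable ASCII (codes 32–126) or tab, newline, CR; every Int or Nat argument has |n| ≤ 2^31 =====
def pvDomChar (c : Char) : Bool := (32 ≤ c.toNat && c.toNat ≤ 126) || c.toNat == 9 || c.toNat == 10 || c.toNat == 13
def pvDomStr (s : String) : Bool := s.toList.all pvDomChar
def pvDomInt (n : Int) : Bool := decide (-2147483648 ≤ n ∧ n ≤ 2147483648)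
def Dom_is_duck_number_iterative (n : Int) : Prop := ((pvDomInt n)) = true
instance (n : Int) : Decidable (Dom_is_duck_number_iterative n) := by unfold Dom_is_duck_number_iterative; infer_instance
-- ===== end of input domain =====

-- B replaces A's arithmetic digit-extraction loop by a positivity guard plus a substring membership test on the decimal string (idiomatic, same cost).


-- ===== PORT A =====
-- while n > 0: digit = n % 10; if digit == 0: has_zero = True; n //= 10; first_digit = False
def isDuckLoop (n : Int) (has_zero : Bool) (first_digit : Bool) : Bool :=
  if h : 0 < n then
    let digit := PySem.Int.mod n 10
    isDuckLoop (PySem.Int.floordiv n 10) (if digit = 0 then true else has_zero) false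
  else
    has_zero
termination_by n.toNat
decreasing_by
  rw [PySem.Int.floordiv_eq_ediv_of_pos (by norm_num)]
  omega

def is_duck_number_iterative (n : Int) : Bool :=
  if n ≤ 0 then false else isDuckLoop n false true

-- ===== PORT B =====
def is_duck_number_iterative_alt (n : Int) : Bool :=
  decide (0 < n) && PySem.Str.isIn "0" (PySem.Int.toStr n)

-- ===== PRECONDITION & SPEC =====
def Spec_is_duck_number_iterative (n : Int) (out : Bool) : Prop := out = is_duck_number_iterative_alt n
instance (n : Int) (out : Bool) : Decidable (Spec_is_duck_number_iterative n out) := by unfold Spec_is_duck_number_iterative; infer_instance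

-- ===== CLAIM =====
def Claim_equal_is_duck_number_iterative : Prop := ∀ (n : Int), Dom_is_duck_number_iterative n → Spec_is_duck_number_iterative n (is_duck_number_iterative n)

-- ===== LEMMAS AND PROOFS =====

-- reference form of Nat.toDigits 10: most-significant first, built by structural recursion
def pvDigitsChars (n : Nat) : List Char :=
  if n < 10 then [Nat.digitChar n]
  else pvDigitsChars (n / 10) ++ [Nat.digitChar (n % 10)]
termination_by n
decreasing_by omega

theorem pvToDigitsCore_eq (f : Nat) : ∀ (n : Nat) (acc : List Char), n < f →
    Nat.toDigitsCore 10 f n acc = pvDigitsChars n ++ acc := by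
  induction f with
  | zero => intro n acc h; omega
  | succ f ih =>
    intro n acc h
    rw [Nat.toDigitsCore]
    by_cases h10 : n < 10
    · have : n / 10 = 0 := by omega
      rw [pvDigitsChars]
      simp [this, h10, Nat.mod_eq_of_lt h10]
    · have hne : ¬ (n / 10 = 0) := by omega
      rw [pvDigitsChars]
      simp only [h10, if_false, hne]
      rw [ih (n / 10) _ (by omega)]
      simp

theorem pvToDigits_eq (n : Nat) : Nat.toDigits 10 n = pvDigitsChars n := by
  rw [Nat.toDigits, pvToDigitsCore_eq (n + 1) n [] (by omega)]
  simp

theorem pvDigitChar_zero (d : Nat) (hd : d < 10) : (Nat.digitChar d = '0') ↔ d = 0 := by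
  interval_cases d <;> simp [Nat.digitChar]

theorem pvIsIn_singleton (l : List Char) :
    PySem.Str.isIn "0" (String.ofList l) = decide ('0' ∈ l) := by
  by_cases h : '0' ∈ l
  · simp [h]
    rw [PySem.Chars.isIn_iff_infix]
    simpa [List.singleton_infix_iff] using h
  · simp [h]
    rw [PySem.Chars.isIn_eq_false_iff]
    simpa [List.singleton_infix_iff] using h

theorem pvLoop_eq (m : Nat) : ∀ (hz fd : Bool),
    isDuckLoop (m : Int) hz fd = (hz || (decide (0 < m) && decide ('0' ∈ pvDigitsChars m))) := by
  induction m using Nat.strong_induction_on with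
  | _ m ih =>
    intro hz fd
    rw [isDuckLoop]
    by_cases hm : 0 < m
    · simp only [show (0:Int) < (m:Int) from by exact_mod_cast hm, dif_pos]
      have hmod : PySem.Int.mod (m : Int) 10 = ((m % 10 : Nat) : Int) := by
        exact_mod_cast PySem.Int.mod_natCast m 10
      have hdiv : PySem.Int.floordiv (m : Int) 10 = ((m / 10 : Nat) : Int) := by
        exact_mod_cast PySem.Int.floordiv_natCast m 10
      rw [hmod, hdiv, ih (m / 10) (by omega)]
      by_cases h10 : m < 10
      · have hdig : pvDigitsChars m = [Nat.digitChar m] := by rw [pvDigitsChars]; simp [h10]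
        have hmem : ¬ ('0' ∈ pvDigitsChars m) := by
          rw [hdig, List.mem_singleton]
          intro hc
          have := (pvDigitChar_zero m h10).mp hc.symm
          omega
        have hq : m / 10 = 0 := by omega
        simp [hq, hmem, hm, Nat.mod_eq_of_lt h10, Nat.pos_iff_ne_zero.mp hm]
      · rw [show pvDigitsChars m = pvDigitsChars (m / 10) ++ [Nat.digitChar (m % 10)] from by
          rw [pvDigitsChars]; simp [h10]]
        have hdivpos : 0 < m / 10 := by omega
        by_cases hd : m % 10 = 0
        · simp [hd, hm, hdivpos, Nat.digitChar]
        · have h2 : ('0' : Char) ≠ Nat.digitChar (m % 10) := by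
            intro hc
            have := (pvDigitChar_zero (m % 10) (by omega)).mp hc.symm
            omega
          have h1 : ¬ ((10:Int) ∣ (m:Int)) := by
            intro hdvd
            have h3 : (10:Nat) ∣ m := by exact_mod_cast hdvd
            omega
          simp [hm, hdivpos, h2, h1]
    · have hm0 : m = 0 := by omega
      subst hm0
      simp

-- ===== VERDICT =====
theorem is_duck_number_iterative_spec : Claim_equal_is_duck_number_iterative := by
  intro n _
  unfold Spec_is_duck_number_iterative is_duck_number_iterative is_duck_number_iterative_alt
  by_cases hn : n ≤ 0
  · simp [hn, show ¬ (0 < n) from by omega]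
  · have hpos : 0 < n := by omega
    have hcast : n = ((n.toNat : Nat) : Int) := by omega
    have hmpos : 0 < n.toNat := by omega
    rw [if_neg hn, hcast, pvLoop_eq n.toNat false true]
    simp only [PySem.Int.toStr, PySem.Int.toChars]
    rw [if_neg (by omega : ¬ ((n.toNat : Nat) : Int) < 0)]
    simp only [Int.toNat_natCast, pvToDigits_eq, pvIsIn_singleton]
    simp [hmpos, hpos]
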